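-- pv_equiv track=rewrite | github.com/prnan4/dsa_algorithms | football_scores.py | football_scores
-- ===== SOURCE A (Python) =====
-- def football_scores(a, b):
--     a.sort()
--     result = []
--
--     # Get the number of elements in list a which are lesser than or equal to value of element i in list b
--     for i in b:
--         low = 0
--         high = len(a) -1
--         while (high >= low):
--             mid = (low + high)//2
--             if i >= a[mid]:
--                 low = mid + 1
--             else:
--                 high = mid - 1
--         result.append(low)
--     return result
-- ===== SOURCE B (Python) =====
-- def football_scores(a, b):
--     a.sort()
--     return [len([x for x in a if x <= i]) for i in b]
-- ===== Notes on version B (the rewrite author's own statement) =====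
-- stated objective: simpler
-- what changed: Replaces the hand-written binary-search loop per query with a direct count of the sorted elements <= each query (filter + len), keeping the a.sort() side effect.
import Mathlib
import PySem

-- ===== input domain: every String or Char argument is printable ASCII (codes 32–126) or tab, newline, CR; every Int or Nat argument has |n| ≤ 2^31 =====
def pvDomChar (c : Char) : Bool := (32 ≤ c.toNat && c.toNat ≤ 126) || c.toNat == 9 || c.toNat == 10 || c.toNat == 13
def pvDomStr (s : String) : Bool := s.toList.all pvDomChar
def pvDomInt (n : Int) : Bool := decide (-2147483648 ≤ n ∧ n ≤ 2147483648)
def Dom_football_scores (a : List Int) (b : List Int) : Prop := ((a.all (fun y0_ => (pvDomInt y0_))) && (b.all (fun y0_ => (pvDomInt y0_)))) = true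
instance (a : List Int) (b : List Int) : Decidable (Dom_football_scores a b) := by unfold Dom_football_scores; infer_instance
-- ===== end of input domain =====

-- B replaces A's per-query binary search by a direct count of sorted elements ≤ the query
-- (simpler); both perform a.sort() — the equivalence proved is about the RETURN value only.

-- ===== PORT A =====
-- A's inner while-loop: low/high binary search; a[mid] is always in range when the
-- loop runs (0 ≤ low ≤ mid ≤ high < len), so pyGetD is exact here.
def bsLoop (sa : List Int) (i : Int) (low high : Int) : Int :=
  if _h : high ≥ low then
    let mid := PySem.Int.floordiv (low + high) 2
    if i ≥ PySem.List.pyGetD sa mid 0 then bsLoop sa i (mid + 1) high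
    else bsLoop sa i low (mid - 1)
  else low
termination_by (high + 1 - low).toNat
decreasing_by
  all_goals
    have hb := PySem.Int.floordiv_two_mid_bounds (lo := low) (hi := high) (by omega)
    omega

def football_scores (a : List Int) (b : List Int) : List Int :=
  let sa := PySem.List.sorted a (fun x => x) false
  b.foldl (fun result i => result ++ [bsLoop sa i 0 ((sa.length : Int) - 1)]) []

-- ===== PORT B =====
def football_scores_alt (a : List Int) (b : List Int) : List Int :=
  let sa := PySem.List.sorted a (fun x => x) false
  b.map (fun i => ((sa.filter (fun x => x ≤ i)).length : Int))

-- ===== PRECONDITION & SPEC =====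
def Spec_football_scores (a : List Int) (b : List Int) (out : List Int) : Prop := out = football_scores_alt a b
instance (a : List Int) (b : List Int) (out : List Int) : Decidable (Spec_football_scores a b out) := by unfold Spec_football_scores; infer_instance

-- ===== CLAIM (what is proved, stated in full; the proofs are below) =====
def Claim_equal_football_scores : Prop := ∀ (a : List Int) (b : List Int), Dom_football_scores a b → Spec_football_scores a b (football_scores a b)

-- ===== LEMMAS AND PROOFS =====

-- If the first k positions satisfy p and the rest do not, the filter has length k.
lemma filter_length_char (p : Int → Bool) :
    ∀ (l : List Int) (k : Nat), k ≤ l.length →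
    (∀ j : Nat, j < k → p (l.getD j 0) = true) →
    (∀ j : Nat, k ≤ j → j < l.length → p (l.getD j 0) = false) →
    (l.filter p).length = k := by
  intro l
  induction l with
  | nil => intro k hk _ _; simp at *; omega
  | cons x t ih =>
    intro k hk h1 h2
    cases k with
    | zero =>
      have hx : p x = false := h2 0 (Nat.le_refl 0) (by simp)
      have : (t.filter p).length = 0 := by
        apply ih 0 (Nat.zero_le _) (by intro j hj; omega)
        intro j _ hj
        have := h2 (j + 1) (by omega) (by simpa using Nat.succ_lt_succ hj)
        simpa using this
      simp [List.filter, hx, this]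
    | succ k' =>
      have hx : p x = true := by simpa using h1 0 (Nat.succ_pos _)
      have ht : (t.filter p).length = k' := by
        apply ih k' (by simpa using Nat.lt_succ_iff.mp (Nat.lt_of_lt_of_le (Nat.lt_succ_self _) hk))
        · intro j hj; simpa using h1 (j + 1) (by omega)
        · intro j hj hjl; simpa using h2 (j + 1) (by omega) (by simpa using Nat.succ_lt_succ hjl)
      simp [List.filter, hx, ht]

-- sorted lists compare by index
lemma sorted_getD_mono (l : List Int) (hs : l.Pairwise (· ≤ ·))
    {j k : Nat} (hjk : j ≤ k) (hk : k < l.length) : l.getD j 0 ≤ l.getD k 0 := by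
  rcases Nat.eq_or_lt_of_le hjk with rfl | hlt
  · exact le_refl _
  · have hj : j < l.length := Nat.lt_trans hlt hk
    have := (List.pairwise_iff_getElem.mp hs) j k hj hk hlt
    simpa [List.getD_eq_getElem?_getD, List.getElem?_eq_getElem, hj, hk] using this

-- Main invariant: the binary search returns the number of elements ≤ i.
lemma bsLoop_eq (sa : List Int) (i : Int) (hs : sa.Pairwise (· ≤ ·)) :
    ∀ (low high : Int), 0 ≤ low → high < (sa.length : Int) → low ≤ high + 1 →
    (∀ j : Nat, (j : Int) < low → sa.getD j 0 ≤ i) →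
    (∀ j : Nat, high < (j : Int) → j < sa.length → i < sa.getD j 0) →
    bsLoop sa i low high = ((sa.filter (fun x => x ≤ i)).length : Int) := by
  intro low high
  induction low, high using bsLoop.induct sa i with
  | case1 low high hge mid hmid ih =>
    intro hl hh hlh h1 h2
    have hb := PySem.Int.floordiv_two_mid_bounds (lo := low) (hi := high) (by omega)
    rw [bsLoop]
    simp only [hge, dite_true]
    have hmr : PySem.List.pyGetD sa (PySem.Int.floordiv (low + high) 2) 0 =
        sa.getD (PySem.Int.floordiv (low + high) 2).toNat 0 := by
      rw [PySem.List.pyGetD_eq_getElem sa 0 (by omega) (by omega),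
          List.getD_eq_getElem sa 0 (by omega)]
    have hmid' : i ≥ sa.getD (PySem.Int.floordiv (low + high) 2).toNat 0 := by
      rw [← hmr]; exact hmid
    rw [hmr, if_pos hmid']
    apply ih (by omega) hh (by omega)
    · intro j hj
      by_cases hjlow : (j : Int) < low
      · exact h1 j hjlow
      · calc sa.getD j 0 ≤ sa.getD (PySem.Int.floordiv (low + high) 2).toNat 0 :=
              sorted_getD_mono sa hs (by omega) (by omega)
          _ ≤ i := hmid'
    · exact h2
  | case2 low high hge mid hmid ih =>
    intro hl hh hlh h1 h2
    have hb := PySem.Int.floordiv_two_mid_bounds (lo := low) (hi := high) (by omega)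
    rw [bsLoop]
    simp only [hge, dite_true]
    have hmr : PySem.List.pyGetD sa (PySem.Int.floordiv (low + high) 2) 0 =
        sa.getD (PySem.Int.floordiv (low + high) 2).toNat 0 := by
      rw [PySem.List.pyGetD_eq_getElem sa 0 (by omega) (by omega),
          List.getD_eq_getElem sa 0 (by omega)]
    have hmid' : ¬ i ≥ sa.getD (PySem.Int.floordiv (low + high) 2).toNat 0 := by
      rw [← hmr]; exact hmid
    rw [hmr, if_neg hmid']
    apply ih hl (by omega) (by omega) h1
    · intro j hj hjl
      by_cases hjh : high < (j : Int)
      · exact h2 j hjh hjl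
      · calc i < sa.getD (PySem.Int.floordiv (low + high) 2).toNat 0 := by
              omega
          _ ≤ sa.getD j 0 := sorted_getD_mono sa hs (by omega) (by omega)
  | case3 low high hge =>
    intro hl hh hlh h1 h2
    rw [bsLoop]
    simp only [hge, dite_false]
    have hf : ((sa.filter (fun x => x ≤ i)).length : Int) = (low.toNat : Int) := by
      congr 1
      apply filter_length_char
      · omega
      · intro j hj
        simpa using h1 j (by omega)
      · intro j hj hjl
        simpa using h2 j (by omega) hjl
    omega

lemma foldl_append_map (f : Int → Int) (b : List Int) :
    ∀ acc : List Int, b.foldl (fun result i => result ++ [f i]) acc = acc ++ b.map f := by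
  induction b with
  | nil => intro acc; simp
  | cons x t ih => intro acc; simp [List.foldl, ih]

-- ===== VERDICT (by name: the statement is the Claim_ definition above) =====
theorem football_scores_spec : Claim_equal_football_scores := by
  intro a b _
  unfold Spec_football_scores football_scores football_scores_alt
  set sa := PySem.List.sorted a (fun x => x) false with hsa
  have hs : sa.Pairwise (· ≤ ·) := by
    simpa using PySem.List.sorted_pairwise (xs := a) (key := fun x => x)
  rw [foldl_append_map]
  simp only [List.nil_append]
  apply List.map_congr_left
  intro i _
  apply bsLoop_eq sa i hs 0 ((sa.length : Int) - 1) (by omega) (by omega) (by omega)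
  · intro j hj; omega
  · intro j hj hjl; omega
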